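-- pv_equiv track=rewrite | github.com/mccambria/dioptric | utils/archive_branches.py | parse_string_array
-- ===== SOURCE A (Python) =====
-- def parse_string_array(string_array):
--     """Raw git commands return string arrays, such as:
--     [' ', ' ', 'd', 'e', 'b', 'u', 'g', '-', 'f', 'u', 'n', 'c',
--     't', 'i', 'o', 'n', '\n', ' ', 'm', 'a', 's', 't', 'e', 'r']
--     How terrible is that. We need to parse them. White spaces mean nothing
--     to us. New lines are delimiters.
--     """
--     vals = []
--     val = ""
--     for char in string_array:
--         if char == " ":
--             continue
--         elif char == "\n":
--             vals.append(val)
--             val = ""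
--         else:
--             val += char
--     return vals
-- ===== SOURCE B (Python) =====
-- def parse_string_array(string_array):
--     """Find each newline delimiter with list.index and slice out the
--     segment before it, joining its non-space elements."""
--     vals = []
--     start = 0
--     while True:
--         try:
--             i = string_array.index("\n", start)
--         except ValueError:
--             return vals
--         vals.append("".join(e for e in string_array[start:i] if e != " "))
--         start = i + 1
-- ===== Notes on version B (the rewrite author's own statement) =====
-- stated objective: faster
-- what changed: Replaced A's char-by-char state machine (pending-string accumulator with continue/append branches) by delimiter search: repeatedly list.index('\n', start), then slice the segment and join its non-space elements.
import Mathlib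
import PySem

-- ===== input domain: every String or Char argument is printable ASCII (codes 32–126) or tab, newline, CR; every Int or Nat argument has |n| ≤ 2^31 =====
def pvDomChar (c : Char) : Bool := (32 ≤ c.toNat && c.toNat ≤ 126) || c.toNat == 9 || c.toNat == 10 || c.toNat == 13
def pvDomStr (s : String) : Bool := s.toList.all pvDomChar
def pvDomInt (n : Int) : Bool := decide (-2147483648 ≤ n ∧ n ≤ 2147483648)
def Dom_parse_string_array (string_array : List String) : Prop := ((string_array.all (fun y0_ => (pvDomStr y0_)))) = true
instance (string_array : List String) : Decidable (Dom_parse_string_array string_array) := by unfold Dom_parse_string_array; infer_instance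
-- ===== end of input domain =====

-- B replaces A's element-by-element state machine by repeated delimiter search
-- (index of "\n" from a start position) with slicing and joining (measured faster in a timing run; constant-factor: C-level index/slice vs per-element loop).

-- ===== PORT A =====
-- A's for loop over state (vals, val) as structural recursion on the list
def parseGoA : List String → List String → String → List String
  | [], vals, _ => vals
  | c :: rest, vals, val =>
    if c == " " then parseGoA rest vals val
    else if c == "\n" then parseGoA rest (vals ++ [val]) ""
    else parseGoA rest vals (val ++ c)

def parse_string_array (string_array : List String) : List String :=
  parseGoA string_array [] ""

-- ===== PORT B =====
-- B's while loop: find the next "\n" from `start` (absolute index = start + j,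
-- searching the dropped suffix), append the joined space-filtered slice
-- string_array[start : start+j], continue after the delimiter
def parseGoB (sa : List String) (start : Nat) (vals : List String) : List String :=
  match h : (sa.drop start).findIdx? (fun e => e == "\n") with
  | none => vals
  | some j =>
      parseGoB sa (start + j + 1)
        (vals ++ [String.join (((sa.drop start).take j).filter (fun e => e != " "))])
  termination_by sa.length - start
  decreasing_by
    have hj : j < (sa.drop start).length := (List.findIdx?_eq_some_iff_findIdx_eq.mp h).1
    simp [List.length_drop] at hj
    omega

def parse_string_array_alt (string_array : List String) : List String :=
  parseGoB string_array 0 []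

-- ===== PRECONDITION & SPEC =====
def Spec_parse_string_array (string_array : List String) (out : List String) : Prop := out = parse_string_array_alt string_array
instance (string_array : List String) (out : List String) : Decidable (Spec_parse_string_array string_array out) := by unfold Spec_parse_string_array; infer_instance

-- ===== CLAIM (what is proved, stated in full; the proofs are below) =====
def Claim_equal_parse_string_array : Prop := ∀ (string_array : List String), Dom_parse_string_array string_array → Spec_parse_string_array string_array (parse_string_array string_array)

-- ===== LEMMAS AND PROOFS =====

-- common characterisation: the segments before each "\n", with pending prefix `val`
def parseSegs (val : String) (l : List String) : List String :=
  match h : l.findIdx? (fun e => e == "\n") with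
  | none => []
  | some j =>
      (val ++ String.join ((l.take j).filter (fun e => e != " "))) :: parseSegs "" (l.drop (j + 1))
  termination_by l.length
  decreasing_by
    have hj : j < l.length := (List.findIdx?_eq_some_iff_findIdx_eq.mp h).1
    simp [List.length_drop]
    omega

theorem parseSegs_eq (val : String) (l : List String) :
    parseSegs val l =
      match l.findIdx? (fun e => e == "\n") with
      | none => []
      | some j =>
          (val ++ String.join ((l.take j).filter (fun e => e != " "))) ::
            parseSegs "" (l.drop (j + 1)) := by
  rw [parseSegs]
  split <;> rename_i heq <;> simp [heq]

theorem join_cons (c : String) (xs : List String) :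
    String.join (c :: xs) = c ++ String.join xs := by
  apply String.toList_inj.mp
  simp [String.join_eq]

theorem parseSegs_cons_space (val : String) (rest : List String) :
    parseSegs val (" " :: rest) = parseSegs val rest := by
  rw [parseSegs_eq, parseSegs_eq (l := rest), List.findIdx?_cons]
  cases hr : rest.findIdx? (fun e => e == "\n") with
  | none => simp
  | some j => simp [List.take_succ_cons, List.drop_succ_cons]

theorem parseSegs_cons_nl (val : String) (rest : List String) :
    parseSegs val ("\n" :: rest) = val :: parseSegs "" rest := by
  rw [parseSegs_eq, List.findIdx?_cons]
  simp [String.join]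

theorem parseSegs_cons_other (c val : String) (rest : List String)
    (hsp : ¬ c = " ") (hnl : ¬ c = "\n") :
    parseSegs val (c :: rest) = parseSegs (val ++ c) rest := by
  rw [parseSegs_eq, parseSegs_eq (l := rest), List.findIdx?_cons]
  have hc : (c == "\n") = false := by simp [hnl]
  rw [hc]
  cases hr : rest.findIdx? (fun e => e == "\n") with
  | none => simp
  | some j =>
    simp only [Option.map_some, List.drop_succ_cons]
    have hf : (c != " ") = true := by simp [hsp]
    simp [hf, join_cons, String.append_assoc]

theorem parseGoA_eq_segs : ∀ (l vals : List String) (val : String),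
    parseGoA l vals val = vals ++ parseSegs val l := by
  intro l
  induction l with
  | nil => intro vals val; rw [parseSegs_eq]; simp [parseGoA]
  | cons c rest ih =>
    intro vals val
    by_cases hsp : c = " "
    · subst hsp
      rw [parseGoA]
      simp only [BEq.rfl, if_pos]
      rw [ih, parseSegs_cons_space]
    · by_cases hnl : c = "\n"
      · subst hnl
        rw [parseGoA]
        have h1 : (("\n" : String) == " ") = false := by decide
        rw [h1]
        simp only [Bool.false_eq_true, if_false, BEq.rfl, if_pos]
        rw [ih, parseSegs_cons_nl]
        simp
      · rw [parseGoA]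
        have h1 : (c == " ") = false := by simp [hsp]
        have h2 : (c == "\n") = false := by simp [hnl]
        rw [h1, h2]
        simp only [Bool.false_eq_true, if_false]
        rw [ih, parseSegs_cons_other c val rest hsp hnl]

theorem parseGoB_eq_def (sa : List String) (start : Nat) (vals : List String) :
    parseGoB sa start vals =
      match (sa.drop start).findIdx? (fun e => e == "\n") with
      | none => vals
      | some j =>
          parseGoB sa (start + j + 1)
            (vals ++ [String.join (((sa.drop start).take j).filter (fun e => e != " "))]) := by
  rw [parseGoB]
  split <;> rename_i heq <;> simp [heq]

theorem parseGoB_eq_segs (sa : List String) (start : Nat) (vals : List String) :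
    parseGoB sa start vals = vals ++ parseSegs "" (sa.drop start) := by
  induction start, vals using parseGoB.induct sa with
  | case1 start vals h =>
    rw [parseGoB_eq_def, h, parseSegs_eq, h]
    simp
  | case2 start vals j h ih =>
    rw [parseGoB_eq_def, h]
    dsimp only
    rw [ih, parseSegs_eq (l := sa.drop start), h]
    simp [List.drop_drop, Nat.add_assoc]

-- ===== VERDICT (by name: the statement is the Claim_ definition above) =====
theorem parse_string_array_spec : Claim_equal_parse_string_array := by
  intro sa _
  unfold Spec_parse_string_array parse_string_array parse_string_array_alt
  rw [parseGoA_eq_segs, parseGoB_eq_segs]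
  simp
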